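-- pv_equiv track=rewrite | github.com/zitaloti/oop-homework | lab_11/determinant_calculation.py | calculate_determinant_recursive
-- ===== SOURCE A (Python) =====
-- def calculate_determinant_recursive(n, a, b):
--     if n == 1:
--         return a + b
--     if n == 2:
--         return (a + b) ** 2 - a * b
--
--     d_prev = calculate_determinant_recursive(n - 1, a, b)
--     d_prev_prev = calculate_determinant_recursive(n - 2, a, b)
--
--     return (a + b) * d_prev - a * b * d_prev_prev
-- ===== SOURCE B (Python) =====
-- def calculate_determinant_recursive(n, a, b):
--     # bottom-up iteration keeping only the last two determinant values
--     d1 = a + b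
--     if n == 1:
--         return d1
--     d2 = (a + b) ** 2 - a * b
--     for _ in range(3, n + 1):
--         d1, d2 = d2, (a + b) * d2 - a * b * d1
--     return d2
-- ===== Notes on version B (the rewrite author's own statement) =====
-- stated objective: faster
-- what changed: Replaces naive double recursion (exponential call tree) with a bottom-up loop keeping only the last two values; intended as asymptotically faster (timing: A timed out at n=16 where B returned, no ratio measurable).
import Mathlib
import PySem

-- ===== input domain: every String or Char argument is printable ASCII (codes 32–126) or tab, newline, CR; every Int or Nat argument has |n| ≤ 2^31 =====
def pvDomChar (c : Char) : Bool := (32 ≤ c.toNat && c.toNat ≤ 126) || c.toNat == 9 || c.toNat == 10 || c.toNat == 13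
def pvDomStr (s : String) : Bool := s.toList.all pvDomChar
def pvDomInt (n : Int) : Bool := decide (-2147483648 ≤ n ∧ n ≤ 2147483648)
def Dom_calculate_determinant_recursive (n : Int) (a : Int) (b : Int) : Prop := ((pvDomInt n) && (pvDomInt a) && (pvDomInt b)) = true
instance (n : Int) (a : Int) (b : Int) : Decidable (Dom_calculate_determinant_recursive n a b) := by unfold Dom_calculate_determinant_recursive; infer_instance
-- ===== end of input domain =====

-- B replaces A's exponential double recursion with a bottom-up loop keeping only the last two values (intended as faster; a timing run saw A time out at n=16 where B returned, so no ratio was measurable).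
-- Pre_ excludes n ≤ 0, where A recurses forever (RecursionError).


-- ===== PORT A =====
-- A's recursion, on the Nat measure n.toNat (exact for every n ≥ 1; Python diverges for n ≤ 0,
-- which Pre_ excludes — the value at 0 is never reached inside Pre_).
def detAuxA (a b : Int) : Nat → Int
  | 0 => 0
  | 1 => a + b
  | 2 => (a + b) ^ 2 - a * b
  | (m + 3) => (a + b) * detAuxA a b (m + 2) - a * b * detAuxA a b (m + 1)

def calculate_determinant_recursive (n : Int) (a : Int) (b : Int) : Int :=
  detAuxA a b n.toNat

-- ===== PORT B =====
-- Python's `for _ in range(3, n+1)` runs (n-2).toNat times with an unused loop variable;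
-- ported as a fold over List.range of that count.
def calculate_determinant_recursive_alt (n : Int) (a : Int) (b : Int) : Int :=
  if n = 1 then a + b
  else
    ((List.range (n - 2).toNat).foldl
      (fun (p : Int × Int) _ => (p.2, (a + b) * p.2 - a * b * p.1))
      (a + b, (a + b) ^ 2 - a * b)).2

-- ===== PRECONDITION & SPEC =====
-- Pre_ excludes n ≤ 0, where Python A never returns (unbounded recursion).
def Pre_calculate_determinant_recursive (n : Int) (a : Int) (b : Int) : Prop := 1 ≤ n
instance (n : Int) (a : Int) (b : Int) : Decidable (Pre_calculate_determinant_recursive n a b) := by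
  unfold Pre_calculate_determinant_recursive; infer_instance
def pvWitness_calculate_determinant_recursive : Int × Int × Int := (5, 2, 3)

def Spec_calculate_determinant_recursive (n : Int) (a : Int) (b : Int) (out : Int) : Prop :=
  out = calculate_determinant_recursive_alt n a b
instance (n : Int) (a : Int) (b : Int) (out : Int) : Decidable (Spec_calculate_determinant_recursive n a b out) := by
  unfold Spec_calculate_determinant_recursive; infer_instance

-- ===== CLAIM (what is proved, stated in full; the proofs are below) =====
def Claim_equal_calculate_determinant_recursive : Prop := ∀ (n : Int) (a : Int) (b : Int), Dom_calculate_determinant_recursive n a b → Pre_calculate_determinant_recursive n a b → Spec_calculate_determinant_recursive n a b (calculate_determinant_recursive n a b)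

-- ===== LEMMAS AND PROOFS =====
-- Loop invariant: after k iterations the pair holds (det (k+1), det (k+2)).
theorem detAux_fold (a b : Int) (k : Nat) :
    (List.range k).foldl
      (fun (p : Int × Int) _ => (p.2, (a + b) * p.2 - a * b * p.1))
      (a + b, (a + b) ^ 2 - a * b)
    = (detAuxA a b (k + 1), detAuxA a b (k + 2)) := by
  induction k with
  | zero => simp [detAuxA]
  | succ k ih =>
      rw [List.range_succ, List.foldl_append, ih]
      simp [detAuxA]

theorem calculate_determinant_recursive_spec : Claim_equal_calculate_determinant_recursive := by
  intro n a b _ hpre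
  unfold Spec_calculate_determinant_recursive calculate_determinant_recursive
    calculate_determinant_recursive_alt
  by_cases h1 : n = 1
  · subst h1; simp [detAuxA]
  · have h2 : (2 : Int) ≤ n := by
      unfold Pre_calculate_determinant_recursive at hpre; omega
    rw [if_neg h1, detAux_fold]
    have : n.toNat = (n - 2).toNat + 2 := by omega
    rw [this]
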